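-- pv_equiv track=rewrite | github.com/EmranCo/freelance2023 | Convex Hull/a/covex hull divide and conqure using queue.py | merge_hulls
-- ===== SOURCE A (Python) =====
-- def merge_hulls(left_hull, right_hull):
--     n, m = len(left_hull), len(right_hull)
--     i = 0
--     j = 0
--     hull = []
--     while i < n and j < m:
--         if left_hull[i][0] <= right_hull[j][0]:
--             hull.append(left_hull[i])
--             i += 1
--         else:
--             hull.append(right_hull[j])
--             j += 1
--     while i < n:
--         hull.append(left_hull[i])
--         i += 1
--     while j < m:
--         hull.append(right_hull[j])
--         j += 1
--     return list(lower_hull(hull)) + list(upper_hull(hull))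
--
-- def lower_hull(hull):
--     result = []
--     for p in hull:
--         while len(result) >= 2 and cross(result[-2], result[-1], p) <= 0:
--             result.pop()
--         result.append(p)
--     return result
--
-- def upper_hull(hull):
--     result = []
--     for p in reversed(hull):
--             while len(result) >= 2 and cross(result[-2], result[-1], p) <= 0:
--                 result.pop()
--             result.append(p)
--     result.pop()
--     return result
--
-- def cross(o, a, b):
--     return (a[0] - o[0]) * (b[1] - o[1]) - (a[1] - o[1]) * (b[0] - o[0])
-- ===== SOURCE B (Python) =====
-- def cross(o, a, b):
--     return (a[0] - o[0]) * (b[1] - o[1]) - (a[1] - o[1]) * (b[0] - o[0])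
--
-- def _merge(xs, ys):
--     # consume the two lists from the front, popping the chosen head
--     xs, ys = list(xs), list(ys)
--     out = []
--     while xs and ys:
--         src = xs if xs[0][0] <= ys[0][0] else ys
--         out.append(src.pop(0))
--     return out + xs + ys
--
-- def _chain(pts):
--     # one shared monotone-chain pass (used for both the lower and the upper hull)
--     res = []
--     for p in pts:
--         while len(res) >= 2 and cross(res[-2], res[-1], p) <= 0:
--             res.pop()
--         res.append(p)
--     return res
--
-- def merge_hulls(left_hull, right_hull):
--     pts = _merge(left_hull, right_hull)
--     return _chain(pts) + _chain(pts[::-1])[:-1]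
-- ===== Notes on version B (the rewrite author's own statement) =====
-- stated objective: simpler
-- what changed: B replaces A's three index-counter merge loops with a single pop-from-front merge over the two lists and collapses the duplicated lower_hull/upper_hull scans into one shared chain helper applied to the merged list and its reverse, taking the upper hull as chain(pts[::-1])[:-1] instead of a separate loop plus result.pop().
-- crash fix: On ([], []) A raises IndexError (result.pop() on the empty upper chain) while B returns []. — e.g. on merge_hulls([], []): A raises IndexError, B returns []
import Mathlib
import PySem

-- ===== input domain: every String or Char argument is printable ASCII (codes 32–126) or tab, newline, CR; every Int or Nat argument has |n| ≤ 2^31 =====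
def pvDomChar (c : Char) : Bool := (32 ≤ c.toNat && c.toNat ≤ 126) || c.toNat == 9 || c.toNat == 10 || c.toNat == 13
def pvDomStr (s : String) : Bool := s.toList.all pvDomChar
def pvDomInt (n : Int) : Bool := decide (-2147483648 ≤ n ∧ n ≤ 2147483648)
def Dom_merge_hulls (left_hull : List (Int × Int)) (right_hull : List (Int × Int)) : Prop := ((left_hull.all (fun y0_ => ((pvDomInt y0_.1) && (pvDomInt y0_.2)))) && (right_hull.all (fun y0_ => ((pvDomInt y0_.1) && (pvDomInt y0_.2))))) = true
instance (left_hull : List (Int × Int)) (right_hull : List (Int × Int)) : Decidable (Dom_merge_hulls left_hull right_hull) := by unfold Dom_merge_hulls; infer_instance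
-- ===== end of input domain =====

-- B: one pop-from-front merge instead of three index loops, and one shared monotone-chain
-- helper (applied to the merged list and its reverse) instead of duplicated lower/upper loops;
-- simpler, not faster. A mutates nothing observable; equivalence is about the return value.


-- ===== PORT A =====
def crossA (o a b : Int × Int) : Int :=
  (a.1 - o.1) * (b.2 - o.2) - (a.2 - o.2) * (b.1 - o.1)

-- A's three while loops over indices i, j, fused into one recursion on the same (i, j) state
def mergeLoopA (L R : List (Int × Int)) (i j : Nat) : List (Int × Int) :=
  if hi : i < L.length then
    if hj : j < R.length then
      if (L[i]).1 ≤ (R[j]).1 then L[i] :: mergeLoopA L R (i + 1) j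
      else R[j] :: mergeLoopA L R i (j + 1)
    else L[i] :: mergeLoopA L R (i + 1) j
  else if hj : j < R.length then R[j] :: mergeLoopA L R i (j + 1)
  else []
termination_by (L.length - i) + (R.length - j)
decreasing_by all_goals omega

-- the inner `while len(result) >= 2 and cross(...) <= 0: result.pop()`; result kept reversed
-- (head = Python's result[-1]), so append = cons and pop = tail
def popWhileA (res : List (Int × Int)) (p : Int × Int) : List (Int × Int) :=
  match res with
  | b :: a :: rest => if crossA a b p ≤ 0 then popWhileA (a :: rest) p else b :: a :: rest
  | r => r

def lower_hullA (hull : List (Int × Int)) : List (Int × Int) :=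
  (hull.foldl (fun res p => p :: popWhileA res p) []).reverse

def upper_hullA (hull : List (Int × Int)) : List (Int × Int) :=
  match hull.reverse.foldl (fun res p => p :: popWhileA res p) [] with
  | [] => []            -- Python: result.pop() raises IndexError here (hull = []); excluded by Pre_
  | _ :: rest => rest.reverse

def merge_hulls (left_hull : List (Int × Int)) (right_hull : List (Int × Int)) : List (Int × Int) :=
  let hull := mergeLoopA left_hull right_hull 0 0
  lower_hullA hull ++ upper_hullA hull

-- ===== PORT B =====
def crossB (o a b : Int × Int) : Int :=
  (a.1 - o.1) * (b.2 - o.2) - (a.2 - o.2) * (b.1 - o.1)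

-- Source B's `while xs and ys: pop the smaller front` plus `out + xs + ys`
def mergeB : List (Int × Int) → List (Int × Int) → List (Int × Int)
  | [], ys => ys
  | x :: xs, [] => x :: xs
  | x :: xs, y :: ys =>
    if x.1 ≤ y.1 then x :: mergeB xs (y :: ys) else y :: mergeB (x :: xs) ys

-- Source B's shared _chain helper; result kept reversed (head = Python's result[-1])
def popWhileB (res : List (Int × Int)) (p : Int × Int) : List (Int × Int) :=
  match res with
  | b :: a :: rest => if crossB a b p ≤ 0 then popWhileB (a :: rest) p else b :: a :: rest
  | r => r

def chainB (pts : List (Int × Int)) : List (Int × Int) :=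
  (pts.foldl (fun res p => p :: popWhileB res p) []).reverse

def merge_hulls_alt (left_hull : List (Int × Int)) (right_hull : List (Int × Int)) : List (Int × Int) :=
  let pts := mergeB left_hull right_hull
  chainB pts ++ (chainB pts.reverse).dropLast   -- pts[::-1] = reverse, l[:-1] = dropLast (exact)

-- ===== PRECONDITION & SPEC =====
-- Pre_ excludes only ([], []), on which A's Python raises IndexError (result.pop() on []).
def Pre_merge_hulls (left_hull : List (Int × Int)) (right_hull : List (Int × Int)) : Prop :=
  ¬ (left_hull = [] ∧ right_hull = [])
instance (left_hull : List (Int × Int)) (right_hull : List (Int × Int)) : Decidable (Pre_merge_hulls left_hull right_hull) := by unfold Pre_merge_hulls; infer_instance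

def pvWitness_merge_hulls : (List (Int × Int)) × (List (Int × Int)) :=
  ([(0, 0), (2, 1)], [(3, 0)])

-- On ([], []) A raises IndexError (result.pop() on the empty upper chain) while B returns [].
def Raises_merge_hulls (left_hull : List (Int × Int)) (right_hull : List (Int × Int)) : Prop :=
  left_hull = [] ∧ right_hull = []
instance (left_hull : List (Int × Int)) (right_hull : List (Int × Int)) : Decidable (Raises_merge_hulls left_hull right_hull) := by unfold Raises_merge_hulls; infer_instance
def pvRaiseWitness_merge_hulls : (List (Int × Int)) × (List (Int × Int)) := ([], [])
def pvRaiseWitnessOut_merge_hulls : List (Int × Int) := []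

def Spec_merge_hulls (left_hull : List (Int × Int)) (right_hull : List (Int × Int)) (out : List (Int × Int)) : Prop := out = merge_hulls_alt left_hull right_hull
instance (left_hull : List (Int × Int)) (right_hull : List (Int × Int)) (out : List (Int × Int)) : Decidable (Spec_merge_hulls left_hull right_hull out) := by unfold Spec_merge_hulls; infer_instance

-- ===== CLAIM (what is proved, stated in full; the proofs are below) =====
def Claim_equal_merge_hulls : Prop := ∀ (left_hull : List (Int × Int)) (right_hull : List (Int × Int)), Dom_merge_hulls left_hull right_hull → Pre_merge_hulls left_hull right_hull → Spec_merge_hulls left_hull right_hull (merge_hulls left_hull right_hull)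
-- (Claim_raises_merge_hulls is discharged by theorem merge_hulls_raises at the bottom of the file)
def Claim_raises_merge_hulls : Prop := (∀ (left_hull : List (Int × Int)) (right_hull : List (Int × Int)), Dom_merge_hulls left_hull right_hull → Raises_merge_hulls left_hull right_hull → ¬ Pre_merge_hulls left_hull right_hull) ∧ (Dom_merge_hulls (pvRaiseWitness_merge_hulls.1) (pvRaiseWitness_merge_hulls.2) ∧ Raises_merge_hulls (pvRaiseWitness_merge_hulls.1) (pvRaiseWitness_merge_hulls.2) ∧ merge_hulls_alt (pvRaiseWitness_merge_hulls.1) (pvRaiseWitness_merge_hulls.2) = pvRaiseWitnessOut_merge_hulls)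

-- ===== LEMMAS AND PROOFS =====

theorem popWhileA_eq (res : List (Int × Int)) (p : Int × Int) :
    popWhileA res p = popWhileB res p := by
  fun_induction popWhileA res p <;> simp_all [popWhileB, crossA, crossB]

theorem mergeB_nil_left (l : List (Int × Int)) : mergeB [] l = l := by
  cases l <;> simp [mergeB]

theorem mergeB_nil_right (l : List (Int × Int)) : mergeB l [] = l := by
  cases l <;> simp [mergeB]

theorem mergeLoopA_eq (L R : List (Int × Int)) (i j : Nat) :
    mergeLoopA L R i j = mergeB (L.drop i) (R.drop j) := by
  fun_induction mergeLoopA L R i j with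
  | case1 i j hi hj hle ih =>
    rw [List.drop_eq_getElem_cons hi, List.drop_eq_getElem_cons hj, mergeB, if_pos hle, ih,
      List.drop_eq_getElem_cons hj]
  | case2 i j hi hj hle ih =>
    rw [List.drop_eq_getElem_cons hi, List.drop_eq_getElem_cons hj, mergeB, if_neg hle, ih,
      List.drop_eq_getElem_cons hi]
  | case3 i j hi hj ih =>
    rw [List.drop_eq_nil_of_le (show R.length ≤ j by omega)] at ih ⊢
    rw [mergeB_nil_right] at ih
    rw [List.drop_eq_getElem_cons hi, mergeB_nil_right, ih]
  | case4 i j hi hj ih =>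
    rw [List.drop_eq_nil_of_le (show L.length ≤ i by omega)] at ih ⊢
    rw [mergeB_nil_left] at ih ⊢
    rw [List.drop_eq_getElem_cons hj, ih]
  | case5 i j hi hj =>
    rw [List.drop_eq_nil_of_le (show L.length ≤ i by omega),
      List.drop_eq_nil_of_le (show R.length ≤ j by omega), mergeB_nil_left]

theorem stepA_eq : (fun (res : List (Int × Int)) p => p :: popWhileA res p)
    = (fun res p => p :: popWhileB res p) := by
  funext res p; rw [popWhileA_eq]

theorem lower_hullA_eq (hull : List (Int × Int)) : lower_hullA hull = chainB hull := by
  unfold lower_hullA chainB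
  rw [stepA_eq]

theorem tail_reverse_eq (l : List (Int × Int)) : l.tail.reverse = l.reverse.dropLast := by
  cases l with
  | nil => rfl
  | cons a t => simp

theorem upper_hullA_eq (hull : List (Int × Int)) :
    upper_hullA hull = (chainB hull.reverse).dropLast := by
  unfold upper_hullA chainB
  rw [stepA_eq]
  cases hull.reverse.foldl (fun res p => p :: popWhileB res p) [] with
  | nil => rfl
  | cons a t => rw [← tail_reverse_eq]; rfl

-- ===== VERDICT (by name: the statement is the Claim_ definition above) =====
theorem merge_hulls_spec : Claim_equal_merge_hulls := by
  intro l r _ _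
  unfold Spec_merge_hulls merge_hulls merge_hulls_alt
  simp only [mergeLoopA_eq, List.drop_zero, lower_hullA_eq, upper_hullA_eq]

def merge_hulls_raises : Claim_raises_merge_hulls := by
  unfold Claim_raises_merge_hulls
  refine ⟨fun l r _ h hp => hp h, by decide, by decide, ?_⟩
  simp [merge_hulls_alt, pvRaiseWitness_merge_hulls, pvRaiseWitnessOut_merge_hulls, mergeB, chainB]
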